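-- pv_equiv track=rewrite | github.com/Jillpie/TheOrangeAlliance | python/MatchOutput.py | matchNumber
-- ===== SOURCE A (Python) =====
-- def matchNumber(rows, matchHistoryTable):
-- 	matchNum = 1
-- 	counter = 0
-- 	for i in range(0,rows):
-- 		if counter < 3:
-- 			matchHistoryTable[i][0] = str(matchNum)
-- 			counter = counter + 1
-- 		else:
-- 			matchHistoryTable[i][0] = str(matchNum)
-- 			matchNum = matchNum+ 1
-- 			counter = 0
-- 	return matchHistoryTable
-- ===== SOURCE B (Python) =====
-- # Stateless closed form: row i belongs to match i//4 + 1 (same in-place mutation as A).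
-- def matchNumber(rows, matchHistoryTable):
-- 	for i in range(rows):
-- 		matchHistoryTable[i][0] = str(i // 4 + 1)
-- 	return matchHistoryTable
-- ===== Notes on version B (the rewrite author's own statement) =====
-- stated objective: simpler
-- what changed: Replaced the matchNum/counter state machine with the closed form i//4+1 computed directly from the loop index.
import Mathlib
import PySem

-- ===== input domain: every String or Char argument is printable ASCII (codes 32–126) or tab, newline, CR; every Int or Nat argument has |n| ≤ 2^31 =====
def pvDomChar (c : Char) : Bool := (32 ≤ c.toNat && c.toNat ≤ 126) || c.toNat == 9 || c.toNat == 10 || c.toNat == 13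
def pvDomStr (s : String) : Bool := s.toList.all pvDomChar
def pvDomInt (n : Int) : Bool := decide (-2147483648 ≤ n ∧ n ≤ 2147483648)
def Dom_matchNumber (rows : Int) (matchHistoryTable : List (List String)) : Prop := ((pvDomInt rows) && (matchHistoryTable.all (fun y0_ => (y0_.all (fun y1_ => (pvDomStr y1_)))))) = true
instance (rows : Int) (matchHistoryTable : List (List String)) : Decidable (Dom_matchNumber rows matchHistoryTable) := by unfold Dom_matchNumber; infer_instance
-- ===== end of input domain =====

-- B replaces A's matchNum/counter state machine by the closed form i//4+1 (simpler);
-- both Pythons mutate matchHistoryTable in place identically, equivalence is about the return value.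


-- ===== PORT A =====
-- matchHistoryTable[i][0] = v is ported as pySetD/pyGetD (total forms); exact under
-- Pre_matchNumber (index in range, row nonempty), exactly where Python does not raise IndexError.
def matchNumber (rows : Int) (matchHistoryTable : List (List String)) : List (List String) :=
  ((PySem.List.pyRange 0 rows 1).foldl
    (fun (st : Int × Int × List (List String)) i =>
      let matchNum := st.1
      let counter := st.2.1
      let tbl := st.2.2
      if counter < 3 then
        (matchNum, counter + 1,
          PySem.List.pySetD tbl i
            (PySem.List.pySetD (PySem.List.pyGetD tbl i []) 0 (PySem.Int.toStr matchNum)))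
      else
        (matchNum + 1, (0 : Int),
          PySem.List.pySetD tbl i
            (PySem.List.pySetD (PySem.List.pyGetD tbl i []) 0 (PySem.Int.toStr matchNum))))
    ((1 : Int), (0 : Int), matchHistoryTable)).2.2

-- ===== PORT B =====
-- same pySetD/pyGetD porting of matchHistoryTable[i][0] = v, exact under Pre_matchNumber
def matchNumber_alt (rows : Int) (matchHistoryTable : List (List String)) : List (List String) :=
  (PySem.List.pyRange 0 rows 1).foldl
    (fun tbl i =>
      PySem.List.pySetD tbl i
        (PySem.List.pySetD (PySem.List.pyGetD tbl i []) 0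
          (PySem.Int.toStr (PySem.Int.floordiv i 4 + 1))))
    matchHistoryTable

-- ===== PRECONDITION & SPEC =====
-- exactly where Python A returns: every visited row exists and is nonempty (else IndexError)
def Pre_matchNumber (rows : Int) (matchHistoryTable : List (List String)) : Prop :=
  rows.toNat ≤ matchHistoryTable.length ∧
    ∀ r ∈ matchHistoryTable.take rows.toNat, r ≠ []
instance (rows : Int) (matchHistoryTable : List (List String)) : Decidable (Pre_matchNumber rows matchHistoryTable) := by unfold Pre_matchNumber; infer_instance

def pvWitness_matchNumber : Int × List (List String) :=
  (5, [["x", "a"], ["y"], ["z"], ["w"], ["q"]])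

def Spec_matchNumber (rows : Int) (matchHistoryTable : List (List String)) (out : List (List String)) : Prop := out = matchNumber_alt rows matchHistoryTable
instance (rows : Int) (matchHistoryTable : List (List String)) (out : List (List String)) : Decidable (Spec_matchNumber rows matchHistoryTable out) := by unfold Spec_matchNumber; infer_instance

-- ===== CLAIM (what is proved, stated in full; the proofs are below) =====
def Claim_equal_matchNumber : Prop := ∀ (rows : Int) (matchHistoryTable : List (List String)), Dom_matchNumber rows matchHistoryTable → Pre_matchNumber rows matchHistoryTable → Spec_matchNumber rows matchHistoryTable (matchNumber rows matchHistoryTable)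

-- ===== LEMMAS AND PROOFS =====

-- A's fold state after n steps: matchNum = n/4 + 1, counter = n % 4, table = B's table.
theorem matchNumber_state (n : Nat) (t : List (List String)) :
    ((PySem.List.pyRange 0 (n : Int) 1).foldl
      (fun (st : Int × Int × List (List String)) i =>
        let matchNum := st.1
        let counter := st.2.1
        let tbl := st.2.2
        if counter < 3 then
          (matchNum, counter + 1,
            PySem.List.pySetD tbl i
              (PySem.List.pySetD (PySem.List.pyGetD tbl i []) 0 (PySem.Int.toStr matchNum)))
        else
          (matchNum + 1, (0 : Int),
            PySem.List.pySetD tbl i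
              (PySem.List.pySetD (PySem.List.pyGetD tbl i []) 0 (PySem.Int.toStr matchNum))))
      ((1 : Int), (0 : Int), t)) =
    (((n / 4 : Nat) : Int) + 1, ((n % 4 : Nat) : Int),
      (PySem.List.pyRange 0 (n : Int) 1).foldl
        (fun tbl i =>
          PySem.List.pySetD tbl i
            (PySem.List.pySetD (PySem.List.pyGetD tbl i []) 0
              (PySem.Int.toStr (PySem.Int.floordiv i 4 + 1))))
        t) := by
  induction n with
  | zero => simp [PySem.List.pyRange_one_eq_nil]
  | succ n ih =>
    have hcast : ((n + 1 : Nat) : Int) = (n : Int) + 1 := by push_cast; ring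
    rw [hcast, PySem.List.pyRange_one_succ_right (by positivity), List.foldl_append,
      List.foldl_append, ih]
    have hdiv : PySem.Int.floordiv (n : Int) 4 = ((n / 4 : Nat) : Int) := by
      exact_mod_cast PySem.Int.floordiv_natCast n 4
    by_cases h : n % 4 < 3
    · have h1 : ((n % 4 : Nat) : Int) < 3 := by exact_mod_cast h
      have h2 : ((n + 1) / 4 : Nat) = n / 4 := by omega
      have h3 : ((n + 1) % 4 : Nat) = n % 4 + 1 := by omega
      simp only [List.foldl_cons, List.foldl_nil, if_pos h1, hdiv, h2, h3]
      push_cast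
      ring_nf
    · have h1 : ¬ ((n % 4 : Nat) : Int) < 3 := by exact_mod_cast h
      have h2 : ((n + 1) / 4 : Nat) = n / 4 + 1 := by omega
      have h3 : ((n + 1) % 4 : Nat) = 0 := by omega
      simp only [List.foldl_cons, List.foldl_nil, if_neg h1, hdiv, h2, h3]
      push_cast
      ring_nf

-- ===== VERDICT (by name: the statement is the Claim_ definition above) =====
theorem matchNumber_spec : Claim_equal_matchNumber := by
  intro rows t _dom _pre
  show matchNumber rows t = matchNumber_alt rows t
  unfold matchNumber matchNumber_alt
  by_cases h : rows ≤ 0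
  · rw [PySem.List.pyRange_one_eq_nil h]
    rfl
  · have : rows = ((rows.toNat : Nat) : Int) := by omega
    rw [this, matchNumber_state]
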